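-- pv_equiv track=rewrite | github.com/giacomoverardo/ecg-imaging | src/utils/fmm.py | get_wave_indexes_circular
-- ===== SOURCE A (Python) =====
-- from typing import List, Dict
--
-- def get_fmm_num_parameters_circular(num_leads:int, num_waves:int)->List[int]:
--     num_parameters_per_wave = (num_leads +num_leads*2 + 2 + 1) # For alpha and beta we have 2x parameters
--     num_parameters = num_parameters_per_wave*num_waves + num_leads #Add also n parameters for parameter M
--     return num_parameters, num_parameters_per_wave
--
-- def get_A_indexes_circular(wave_index:int, num_leads:int, num_waves:int):
--     num_parameters, num_parameters_per_wave = get_fmm_num_parameters_circular(num_leads=num_leads,num_waves=num_waves)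
--     start_index = num_parameters_per_wave * wave_index
--     end_index = start_index + num_leads
--     return start_index, end_index
--
-- def get_alpha_indexes_circular(wave_index:int, num_leads:int, num_waves:int):
--     num_parameters, num_parameters_per_wave = get_fmm_num_parameters_circular(num_leads=num_leads,num_waves=num_waves)
--     start_index = num_parameters_per_wave * wave_index + num_leads
--     end_index = start_index + 2
--     return start_index, end_index
--
-- def get_beta_indexes_circular(wave_index:int, num_leads:int, num_waves:int):
--     num_parameters, num_parameters_per_wave = get_fmm_num_parameters_circular(num_leads=num_leads,num_waves=num_waves)
--     start_index = num_parameters_per_wave * wave_index + num_leads + 2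
--     end_index = start_index + num_leads*2
--     return start_index, end_index
--
-- def get_omega_indexes_circular(wave_index:int, num_leads:int, num_waves:int):
--     num_parameters, num_parameters_per_wave = get_fmm_num_parameters_circular(num_leads=num_leads,num_waves=num_waves)
--     start_index = num_parameters_per_wave * wave_index + num_leads + 2 + num_leads*2
--     end_index = start_index + 1
--     return start_index, end_index
--
-- def get_wave_indexes_circular(wave_index:int, num_leads:int, num_waves:int)->List:
--     wave_indexes = []
--     for c,f in zip(["A","Alpha","Beta","Omega"],
--                    [get_A_indexes_circular,get_alpha_indexes_circular,
--                     get_beta_indexes_circular,get_omega_indexes_circular]):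
--         start_index,end_index=f(wave_index=wave_index,num_leads=num_leads,num_waves=num_waves)
--         c_index_list = list(range(start_index,end_index))
--         wave_indexes.extend(c_index_list)
--     return wave_indexes
-- ===== SOURCE B (Python) =====
-- def get_wave_indexes_circular(wave_index, num_leads, num_waves):
--     # The A/Alpha/Beta/Omega sub-ranges are contiguous and exactly tile one
--     # wave's parameter block, so the whole block is a single range.
--     width = num_leads + num_leads * 2 + 2 + 1
--     base = width * wave_index
--     return list(range(base, base + width))
-- ===== Notes on version B (the rewrite author's own statement) =====
-- stated objective: simpler
-- what changed: Replaces the loop over four per-component index helpers and list.extend by one closed-form range over the wave's contiguous parameter block.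
-- outside the precondition, e.g. on get_wave_indexes_circular(0, -1, 1): A returns [-1, 0, -1], B returns []
import Mathlib
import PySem

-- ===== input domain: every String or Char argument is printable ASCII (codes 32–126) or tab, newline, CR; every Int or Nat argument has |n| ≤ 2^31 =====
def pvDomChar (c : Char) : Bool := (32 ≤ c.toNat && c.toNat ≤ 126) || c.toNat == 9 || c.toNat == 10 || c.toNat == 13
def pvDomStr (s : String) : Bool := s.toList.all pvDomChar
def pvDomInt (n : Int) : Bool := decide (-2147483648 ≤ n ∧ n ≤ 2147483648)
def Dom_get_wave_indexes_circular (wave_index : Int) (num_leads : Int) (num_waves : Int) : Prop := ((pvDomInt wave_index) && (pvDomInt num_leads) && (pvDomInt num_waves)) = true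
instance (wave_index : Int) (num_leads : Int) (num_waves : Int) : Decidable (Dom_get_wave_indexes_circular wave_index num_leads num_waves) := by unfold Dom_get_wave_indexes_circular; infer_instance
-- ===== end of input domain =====

-- B replaces A's loop over four per-component index helpers with one closed-form
-- contiguous range for the wave's parameter block (objective: simpler).


-- ===== PORT A =====
def get_fmm_num_parameters_circular (num_leads : Int) (num_waves : Int) : Int × Int :=
  let num_parameters_per_wave := num_leads + num_leads * 2 + 2 + 1
  let num_parameters := num_parameters_per_wave * num_waves + num_leads
  (num_parameters, num_parameters_per_wave)

def get_A_indexes_circular (wave_index : Int) (num_leads : Int) (num_waves : Int) : Int × Int :=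
  let p := get_fmm_num_parameters_circular num_leads num_waves
  let start_index := p.2 * wave_index
  (start_index, start_index + num_leads)

def get_alpha_indexes_circular (wave_index : Int) (num_leads : Int) (num_waves : Int) : Int × Int :=
  let p := get_fmm_num_parameters_circular num_leads num_waves
  let start_index := p.2 * wave_index + num_leads
  (start_index, start_index + 2)

def get_beta_indexes_circular (wave_index : Int) (num_leads : Int) (num_waves : Int) : Int × Int :=
  let p := get_fmm_num_parameters_circular num_leads num_waves
  let start_index := p.2 * wave_index + num_leads + 2
  (start_index, start_index + num_leads * 2)

def get_omega_indexes_circular (wave_index : Int) (num_leads : Int) (num_waves : Int) : Int × Int :=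
  let p := get_fmm_num_parameters_circular num_leads num_waves
  let start_index := p.2 * wave_index + num_leads + 2 + num_leads * 2
  (start_index, start_index + 1)

-- the zip of names and functions; names are unused, as in A
def get_wave_indexes_circular (wave_index : Int) (num_leads : Int) (num_waves : Int) : List Int :=
  (List.zip ["A", "Alpha", "Beta", "Omega"]
    [get_A_indexes_circular, get_alpha_indexes_circular,
     get_beta_indexes_circular, get_omega_indexes_circular]).foldl
    (fun wave_indexes cf =>
      let p := cf.2 wave_index num_leads num_waves
      wave_indexes ++ PySem.List.pyRange p.1 p.2 1) []

-- ===== PORT B =====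
def get_wave_indexes_circular_alt (wave_index : Int) (num_leads : Int) (num_waves : Int) : List Int :=
  let width := num_leads + num_leads * 2 + 2 + 1
  let base := width * wave_index
  PySem.List.pyRange base (base + width) 1

-- ===== PRECONDITION & SPEC =====
-- Pre_ restricts to the function's natural domain (a non-negative lead count); for
-- negative num_leads A's concatenation of partially-empty ranges is an accident of
-- its implementation and is not contiguous.
def Pre_get_wave_indexes_circular (wave_index : Int) (num_leads : Int) (num_waves : Int) : Prop := 0 ≤ num_leads
instance (wave_index : Int) (num_leads : Int) (num_waves : Int) : Decidable (Pre_get_wave_indexes_circular wave_index num_leads num_waves) := by unfold Pre_get_wave_indexes_circular; infer_instance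
def pvWitness_get_wave_indexes_circular : Int × Int × Int := (1, 3, 2)

def Spec_get_wave_indexes_circular (wave_index : Int) (num_leads : Int) (num_waves : Int) (out : List Int) : Prop := out = get_wave_indexes_circular_alt wave_index num_leads num_waves
instance (wave_index : Int) (num_leads : Int) (num_waves : Int) (out : List Int) : Decidable (Spec_get_wave_indexes_circular wave_index num_leads num_waves out) := by unfold Spec_get_wave_indexes_circular; infer_instance

-- ===== CLAIM (what is proved, stated in full; the proofs are below) =====
def Claim_equal_get_wave_indexes_circular : Prop := ∀ (wave_index : Int) (num_leads : Int) (num_waves : Int), Dom_get_wave_indexes_circular wave_index num_leads num_waves → Pre_get_wave_indexes_circular wave_index num_leads num_waves → Spec_get_wave_indexes_circular wave_index num_leads num_waves (get_wave_indexes_circular wave_index num_leads num_waves)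

-- ===== LEMMAS AND PROOFS =====

-- ===== VERDICT (by name: the statement is the Claim_ definition above) =====
theorem get_wave_indexes_circular_spec : Claim_equal_get_wave_indexes_circular := by
  intro w l n _ hl
  have hl' : (0 : Int) ≤ l := hl
  unfold Spec_get_wave_indexes_circular get_wave_indexes_circular get_wave_indexes_circular_alt
    get_A_indexes_circular get_alpha_indexes_circular get_beta_indexes_circular
    get_omega_indexes_circular get_fmm_num_parameters_circular
  simp only [List.zip, List.zipWith, List.foldl, List.nil_append]
  have h1 : (l + l * 2 + 2 + 1) * w ≤ (l + l * 2 + 2 + 1) * w + l := by omega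
  have h2 : (l + l * 2 + 2 + 1) * w + l ≤ (l + l * 2 + 2 + 1) * w + l + 2 := by omega
  have h3 : (l + l * 2 + 2 + 1) * w + l + 2 ≤ (l + l * 2 + 2 + 1) * w + l + 2 + l * 2 := by omega
  have h4 : (l + l * 2 + 2 + 1) * w + l + 2 + l * 2 ≤ (l + l * 2 + 2 + 1) * w + l + 2 + l * 2 + 1 := by omega
  rw [← PySem.List.pyRange_one_append _ _ _ h1 h2,
      ← PySem.List.pyRange_one_append _ _ _ (le_trans h1 h2) h3,
      ← PySem.List.pyRange_one_append _ _ _ (le_trans (le_trans h1 h2) h3) h4]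
  ring_nf
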